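-- pv_equiv track=rewrite | github.com/joshua-linsanity/public-key-cryptosystems | rsa_alice.py | septemvigesimal
-- ===== SOURCE A (Python) =====
-- def septemvigesimal(m: int, case: str):
--     decrypted_message = ""
--
--     # count from last to first char
--     while True:
--         remainder = m % 27
--
--         if remainder != 0:
--             decrypted_message += chr((remainder + 64))
--         else:
--             # must be space; remainder = 26
--             # 95 is ASCII space code
--             decrypted_message += chr(32)
--
--         # if floor function is 0, then no more digits
--         m //= 27
--         if m == 0:
--             break
--
--     # reverse so it becomes first to last
--     not_reversed = decrypted_message[::-1]
--     secret = ""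
--
--     for idx, val in enumerate(case):
--         # default is upper, change to lower
--         if val == '0':
--             character = not_reversed[idx].lower()
--             secret += character
--         else:
--             secret += not_reversed[idx]
--     return secret
-- ===== SOURCE B (Python) =====
-- def septemvigesimal(m: int, case: str):
--     # Recursive decode builds the digits first-to-last directly (no reverse);
--     # the case mask is applied by zipping, truncating to len(case).
--     def decode(md):
--         q, r = divmod(md, 27)
--         prefix = decode(q) if q > 0 else ""
--         return prefix + (chr(32) if r == 0 else chr(r + 64))
--
--     decoded = decode(m)
--     return "".join(c.lower() if v == '0' else c for v, c in zip(case, decoded))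
-- ===== Notes on version B (the rewrite author's own statement) =====
-- stated objective: alternative
-- what changed: B decodes recursively on m//27, building the digit string in forward order with no reversal, and applies the case mask by zipping case with the decoded string instead of an indexed loop into a reversed accumulator.
import Mathlib
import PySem

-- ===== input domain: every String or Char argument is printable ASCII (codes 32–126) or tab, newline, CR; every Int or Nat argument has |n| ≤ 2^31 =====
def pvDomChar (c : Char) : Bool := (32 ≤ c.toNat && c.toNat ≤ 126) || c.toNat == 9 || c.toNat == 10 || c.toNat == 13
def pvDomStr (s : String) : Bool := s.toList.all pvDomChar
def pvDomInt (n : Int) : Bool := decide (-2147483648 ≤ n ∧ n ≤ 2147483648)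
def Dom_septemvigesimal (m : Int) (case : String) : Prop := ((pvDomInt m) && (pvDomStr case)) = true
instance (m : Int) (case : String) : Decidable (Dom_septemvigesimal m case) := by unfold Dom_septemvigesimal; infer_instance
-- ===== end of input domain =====

-- B replaces A's while-loop-then-reverse by a recursion on m//27 that yields the digits in
-- forward order, and replaces the indexed case loop by a zip; same values on Pre_, no speed claim.

-- ===== PORT A =====
-- fuel 64 is a totality guard only: on 0 ≤ m ≤ 2^31 the Python loop runs at most 7 times.
def pvACh (r : Int) : Char := if r ≠ 0 then Char.ofNat (r + 64).toNat else Char.ofNat 32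

def pvALoop : Nat → Int → List Char → List Char
  | 0, _, acc => acc
  | f+1, m, acc =>
    let acc' := acc ++ [pvACh (PySem.Int.mod m 27)]
    let m' := PySem.Int.floordiv m 27
    if m' = 0 then acc' else pvALoop f m' acc'

def septemvigesimal (m : Int) (case : String) : String :=
  let notRev := (pvALoop 64 m []).reverse
  String.mk ((PySem.List.enumerate case.toList).foldl
    (fun acc p =>
      if p.2 = '0' then acc ++ [PySem.Chars.lowerChar ((PySem.List.pyGet? notRev p.1).getD ' ')]
      else acc ++ [(PySem.List.pyGet? notRev p.1).getD ' ']) [])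

-- ===== PORT B =====
-- fuel 64 is a totality guard only, as above; divmod(md, 27) = (floordiv, mod), divisor 27 ≠ 0.
def pvBCh (r : Int) : Char := if r = 0 then Char.ofNat 32 else Char.ofNat (r + 64).toNat

def pvBDecode : Nat → Int → List Char
  | 0, _ => []
  | f+1, m =>
    let q := PySem.Int.floordiv m 27
    (if 0 < q then pvBDecode f q else []) ++ [pvBCh (PySem.Int.mod m 27)]

def septemvigesimal_alt (m : Int) (case : String) : String :=
  String.mk (List.zipWith (fun v c => if v = '0' then PySem.Chars.lowerChar c else c)
    case.toList (pvBDecode 64 m))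

-- ===== PRECONDITION & SPEC =====
-- Pre_ excludes m < 0 (A's loop never terminates there) and case longer than the base-27
-- digit count of m (A raises IndexError there); on everything else A returns normally.
def Pre_septemvigesimal (m : Int) (case : String) : Prop :=
  0 ≤ m ∧ (case.toList.length ≤ 1 ∨ (27:Int) ^ (case.toList.length - 1) ≤ m)
instance (m : Int) (case : String) : Decidable (Pre_septemvigesimal m case) := by
  unfold Pre_septemvigesimal; infer_instance

def pvWitness_septemvigesimal : Int × String := (27, "A0")

def Spec_septemvigesimal (m : Int) (case : String) (out : String) : Prop := out = septemvigesimal_alt m case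
instance (m : Int) (case : String) (out : String) : Decidable (Spec_septemvigesimal m case out) := by unfold Spec_septemvigesimal; infer_instance

-- ===== CLAIM (what is proved, stated in full; the proofs are below) =====
def Claim_equal_septemvigesimal : Prop := ∀ (m : Int) (case : String), Dom_septemvigesimal m case → Pre_septemvigesimal m case → Spec_septemvigesimal m case (septemvigesimal m case)

-- ===== LEMMAS AND PROOFS =====

theorem pvALoop_succ (f : Nat) (m : Int) (acc : List Char) :
    pvALoop (f+1) m acc =
      if PySem.Int.floordiv m 27 = 0 then acc ++ [pvACh (PySem.Int.mod m 27)]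
      else pvALoop f (PySem.Int.floordiv m 27) (acc ++ [pvACh (PySem.Int.mod m 27)]) := rfl

theorem pvBDecode_succ (f : Nat) (m : Int) :
    pvBDecode (f+1) m =
      (if 0 < PySem.Int.floordiv m 27 then pvBDecode f (PySem.Int.floordiv m 27) else [])
        ++ [pvBCh (PySem.Int.mod m 27)] := rfl

theorem pvCh_eq (r : Int) : pvACh r = pvBCh r := by
  by_cases h : r = 0 <;> simp [pvACh, pvBCh, h]

theorem pvALoop_acc (f : Nat) : ∀ (m : Int) (acc : List Char),
    pvALoop f m acc = acc ++ pvALoop f m [] := by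
  induction f with
  | zero => intro m acc; simp [pvALoop]
  | succ f ih =>
    intro m acc
    rw [pvALoop_succ, pvALoop_succ]
    by_cases h : PySem.Int.floordiv m 27 = 0
    · rw [if_pos h, if_pos h, List.nil_append]
    · rw [if_neg h, if_neg h, ih _ (acc ++ _), ih _ ([] ++ _), List.nil_append,
        List.append_assoc]

theorem pvRev_eq (f : Nat) : ∀ (m : Int), 0 ≤ m →
    (pvALoop f m []).reverse = pvBDecode f m := by
  induction f with
  | zero => intro m _; simp [pvALoop, pvBDecode]
  | succ f ih =>
    intro m hm
    have hq : 0 ≤ PySem.Int.floordiv m 27 := by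
      rw [PySem.Int.floordiv_eq_ediv_of_pos (by norm_num)]
      exact Int.ediv_nonneg hm (by norm_num)
    rw [pvALoop_succ, pvBDecode_succ]
    by_cases h : PySem.Int.floordiv m 27 = 0
    · rw [if_pos h, if_neg (by omega), List.nil_append, List.nil_append,
        List.reverse_singleton, pvCh_eq]
    · have hpos : 0 < PySem.Int.floordiv m 27 := lt_of_le_of_ne hq (Ne.symm h)
      rw [if_neg h, if_pos hpos, pvALoop_acc, List.reverse_append, ih _ hq,
        List.nil_append, List.reverse_singleton, pvCh_eq]

theorem pvBDecode_len_pos (f : Nat) (m : Int) (hf : 1 ≤ f) :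
    1 ≤ (pvBDecode f m).length := by
  cases f with
  | zero => omega
  | succ f => rw [pvBDecode_succ]; simp

theorem pvBDecode_len (k : Nat) : ∀ (f : Nat) (m : Int), 0 ≤ m → k + 1 ≤ f →
    (27:Int) ^ k ≤ m → k + 1 ≤ (pvBDecode f m).length := by
  induction k with
  | zero => intro f m _ hf _; exact pvBDecode_len_pos f m hf
  | succ k ih =>
    intro f m hm hf hpow
    cases f with
    | zero => omega
    | succ f =>
      have hq : (27:Int) ^ k ≤ PySem.Int.floordiv m 27 := by
        rw [PySem.Int.le_floordiv_iff_mul_le (by norm_num)]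
        calc (27:Int) ^ k * 27 = 27 ^ (k+1) := by ring
        _ ≤ m := hpow
      have hqpos : 0 < PySem.Int.floordiv m 27 :=
        lt_of_lt_of_le (by positivity) hq
      rw [pvBDecode_succ, if_pos hqpos]
      rw [List.length_append, List.length_cons, List.length_nil]
      have := ih f (PySem.Int.floordiv m 27) hqpos.le (by omega) hq
      omega

theorem pvZip_eq (h : Char → Char → Char) (d : List Char) :
    ∀ (L : List Char) (s : Nat), L.length + s ≤ d.length →
    (PySem.List.enumerate L (s:Int)).map (fun p => h p.2 ((PySem.List.pyGet? d p.1).getD ' '))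
      = List.zipWith h L (d.drop s) := by
  intro L
  induction L with
  | nil => intro s _; simp [PySem.List.enumerate_nil]
  | cons x L ih =>
    intro s hs
    have hslt : s < d.length := by simp at hs; omega
    rw [PySem.List.enumerate_cons, List.drop_eq_getElem_cons hslt]
    simp only [List.map_cons, List.zipWith_cons_cons]
    have hh : (PySem.List.pyGet? d ((s:Nat):Int)).getD ' ' = d[s] := by
      simp [List.getElem?_eq_getElem hslt]
    have hcast : ((s:Nat):Int) + 1 = ((s+1 : Nat) : Int) := by push_cast; ring
    rw [hh, hcast, ih (s+1) (by simp at hs ⊢; omega)]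

-- ===== VERDICT (by name: the statement is the Claim_ definition above) =====
theorem septemvigesimal_spec : Claim_equal_septemvigesimal := by
  intro m case hdom hpre
  obtain ⟨hm, hlen⟩ := hpre
  unfold Spec_septemvigesimal septemvigesimal septemvigesimal_alt
  rw [pvRev_eq 64 m hm]
  have hmle : m ≤ 2147483648 := by
    unfold Dom_septemvigesimal pvDomInt at hdom
    simp at hdom; omega
  have hlend : case.toList.length ≤ (pvBDecode 64 m).length := by
    rcases Nat.eq_zero_or_pos case.toList.length with h0 | h1
    · omega
    · have h1' : 1 ≤ (pvBDecode 64 m).length := pvBDecode_len_pos 64 m (by omega)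
      rcases hlen with h | h
      · omega
      · have hk7 : case.toList.length - 1 ≤ 6 := by
          by_contra hk
          have hmono : (27:Int) ^ 7 ≤ 27 ^ (case.toList.length - 1) :=
            pow_le_pow_right₀ (by norm_num) (by omega)
          have h27 : ((27:Int)) ^ 7 = 10460353203 := by norm_num
          rw [h27] at hmono
          omega
        have := pvBDecode_len (case.toList.length - 1) 64 m hm (by omega) h
        omega
  have hfun : (fun (acc : List Char) (p : Int × Char) =>
      if p.2 = '0' then acc ++ [PySem.Chars.lowerChar ((PySem.List.pyGet? (pvBDecode 64 m) p.1).getD ' ')]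
      else acc ++ [(PySem.List.pyGet? (pvBDecode 64 m) p.1).getD ' '])
      = fun acc p => acc ++ [if p.2 = '0'
          then PySem.Chars.lowerChar ((PySem.List.pyGet? (pvBDecode 64 m) p.1).getD ' ')
          else (PySem.List.pyGet? (pvBDecode 64 m) p.1).getD ' '] := by
    funext acc p; split <;> rfl
  simp only [hfun, PySem.List.foldl_append_singleton_eq_map, List.nil_append]
  congr 1
  have hz := pvZip_eq (fun v c => if v = '0' then PySem.Chars.lowerChar c else c)
    (pvBDecode 64 m) case.toList 0 (by omega)
  simpa using hz
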